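-- pv_equiv track=rewrite | github.com/imsebeom/hwpx2 | scripts/hwpx_form_filler.py | _find_label_for_cell
-- ===== SOURCE A (Python) =====
-- from typing import Dict, List, Tuple, Optional, Any
--
-- def _find_label_for_cell(analysis: Dict, row: int, col: int) -> str:
--     """내용 셀에 해당하는 레이블 찾기"""
--     # 같은 행의 왼쪽 레이블 찾기
--     for r, c, text in analysis['label_cells']:
--         if r == row and c < col:
--             return text.replace('\n', '_').strip()
--
--     # 같은 열의 위쪽 레이블 찾기
--     for r, c, text in analysis['label_cells']:
--         if c == col and r < row:
--             return text.replace('\n', '_').strip()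
--
--     return f"cell_{row}_{col}"
-- ===== SOURCE B (Python) =====
-- def _find_label_for_cell(analysis, row, col):
--     """Single pass over label_cells keeping both candidates; clean the chosen one."""
--     row_label = None
--     col_label = None
--     for r, c, text in analysis['label_cells']:
--         if row_label is None and r == row and c < col:
--             row_label = text
--         if col_label is None and c == col and r < row:
--             col_label = text
--     chosen = row_label if row_label is not None else col_label
--     if chosen is None:
--         return f"cell_{row}_{col}"
--     return chosen.replace('\n', '_').strip()
-- ===== Notes on version B (the rewrite author's own statement) =====
-- stated objective: alternative
-- what changed: Replaces A's two sequential scans of label_cells by one pass that maintains both the first row-label and first column-label candidates and applies the replace/strip only to the chosen one.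
import Mathlib
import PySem

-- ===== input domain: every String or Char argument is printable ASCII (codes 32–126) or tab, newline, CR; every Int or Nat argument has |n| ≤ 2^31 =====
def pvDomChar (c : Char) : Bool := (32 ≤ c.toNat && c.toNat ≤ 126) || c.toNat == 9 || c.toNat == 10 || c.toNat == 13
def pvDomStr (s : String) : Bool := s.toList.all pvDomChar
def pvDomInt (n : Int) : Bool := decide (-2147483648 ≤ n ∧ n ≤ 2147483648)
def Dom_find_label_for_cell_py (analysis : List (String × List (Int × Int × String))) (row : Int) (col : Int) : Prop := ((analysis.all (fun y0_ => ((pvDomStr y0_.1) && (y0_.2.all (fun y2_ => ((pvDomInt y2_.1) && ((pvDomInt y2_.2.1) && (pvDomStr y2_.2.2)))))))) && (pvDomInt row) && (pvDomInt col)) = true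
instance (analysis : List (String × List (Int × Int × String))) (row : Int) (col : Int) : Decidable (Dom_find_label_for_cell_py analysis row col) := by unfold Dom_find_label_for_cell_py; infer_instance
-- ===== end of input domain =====

-- B replaces A's two sequential scans by one pass keeping both candidates (objective: alternative, same cost).
-- Pre_ excludes inputs where the dict has no 'label_cells' key, on which A (and B) raise KeyError.

-- ===== PORT A =====
-- analysis['label_cells']: first-match association-list lookup (KeyError = none, excluded by Pre_)
def pvKeyA : List (String × List (Int × Int × String)) → Option (List (Int × Int × String))
  | [] => none
  | (k, v) :: rest => if k = "label_cells" then some v else pvKeyA rest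

-- text.replace('\n', '_').strip()
def pvCleanA (t : String) : String := PySem.Str.strip (PySem.Str.replace t "\n" "_")

-- first loop of A: same row, on the left
def pvScanRowA (row col : Int) : List (Int × Int × String) → Option String
  | [] => none
  | (r, c, text) :: rest =>
      if r = row ∧ c < col then some (pvCleanA text) else pvScanRowA row col rest

-- second loop of A: same column, above
def pvScanColA (row col : Int) : List (Int × Int × String) → Option String
  | [] => none
  | (r, c, text) :: rest =>
      if c = col ∧ r < row then some (pvCleanA text) else pvScanColA row col rest

def find_label_for_cell_py (analysis : List (String × List (Int × Int × String))) (row : Int) (col : Int) : String :=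
  let cells := (pvKeyA analysis).getD []   -- Pre_ guarantees the key exists
  match pvScanRowA row col cells with
  | some s => s
  | none =>
      match pvScanColA row col cells with
      | some s => s
      | none => "cell_" ++ PySem.Int.toStr row ++ "_" ++ PySem.Int.toStr col

-- ===== PORT B =====
def pvKeyB : List (String × List (Int × Int × String)) → Option (List (Int × Int × String))
  | [] => none
  | (k, v) :: rest => if k = "label_cells" then some v else pvKeyB rest

-- one step of B's single loop: update (row_label, col_label)
def pvStepB (row col : Int) (acc : Option String × Option String) (cell : Int × Int × String) :
    Option String × Option String :=
  let (r, c, text) := cell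
  ( if acc.1 = none ∧ r = row ∧ c < col then some text else acc.1,
    if acc.2 = none ∧ c = col ∧ r < row then some text else acc.2 )

def find_label_for_cell_py_alt (analysis : List (String × List (Int × Int × String))) (row : Int) (col : Int) : String :=
  let cells := (pvKeyB analysis).getD []
  let acc := cells.foldl (pvStepB row col) (none, none)
  let chosen := match acc.1 with | some s => some s | none => acc.2
  match chosen with
  | none => "cell_" ++ PySem.Int.toStr row ++ "_" ++ PySem.Int.toStr col
  | some t => PySem.Str.strip (PySem.Str.replace t "\n" "_")

-- ===== PRECONDITION & SPEC =====
-- Pre_: the key 'label_cells' is present; otherwise A raises KeyError.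
def Pre_find_label_for_cell_py (analysis : List (String × List (Int × Int × String))) (row : Int) (col : Int) : Prop :=
  "label_cells" ∈ analysis.map (·.1)
instance (analysis : List (String × List (Int × Int × String))) (row : Int) (col : Int) : Decidable (Pre_find_label_for_cell_py analysis row col) := by unfold Pre_find_label_for_cell_py; infer_instance
def pvWitness_find_label_for_cell_py : (List (String × List (Int × Int × String))) × Int × Int :=
  ([("label_cells", [(0, 0, "name"), (1, 0, "age")])], 1, 1)
def Spec_find_label_for_cell_py (analysis : List (String × List (Int × Int × String))) (row : Int) (col : Int) (out : String) : Prop := out = find_label_for_cell_py_alt analysis row col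
instance (analysis : List (String × List (Int × Int × String))) (row : Int) (col : Int) (out : String) : Decidable (Spec_find_label_for_cell_py analysis row col out) := by unfold Spec_find_label_for_cell_py; infer_instance

-- ===== CLAIM (what is proved, stated in full; the proofs are below) =====
def Claim_equal_find_label_for_cell_py : Prop := ∀ (analysis : List (String × List (Int × Int × String))) (row : Int) (col : Int), Dom_find_label_for_cell_py analysis row col → Pre_find_label_for_cell_py analysis row col → Spec_find_label_for_cell_py analysis row col (find_label_for_cell_py analysis row col)

-- ===== LEMMAS AND PROOFS =====
theorem pvKeyB_eq_A (l : List (String × List (Int × Int × String))) : pvKeyB l = pvKeyA l := by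
  induction l with
  | nil => rfl
  | cons h t ih => simp [pvKeyA, pvKeyB, ih]

-- first raw row-label / col-label in the list (proof-only helpers)
def pvRawRow (row col : Int) : List (Int × Int × String) → Option String
  | [] => none
  | (r, c, text) :: rest =>
      if r = row ∧ c < col then some text else pvRawRow row col rest

def pvRawCol (row col : Int) : List (Int × Int × String) → Option String
  | [] => none
  | (r, c, text) :: rest =>
      if c = col ∧ r < row then some text else pvRawCol row col rest

theorem scanRowA_map (row col : Int) (cells : List (Int × Int × String)) :
    pvScanRowA row col cells = (pvRawRow row col cells).map pvCleanA := by
  induction cells with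
  | nil => rfl
  | cons hd tl ih =>
      obtain ⟨r, c, text⟩ := hd
      simp only [pvScanRowA, pvRawRow]
      split_ifs <;> simp [ih]

theorem scanColA_map (row col : Int) (cells : List (Int × Int × String)) :
    pvScanColA row col cells = (pvRawCol row col cells).map pvCleanA := by
  induction cells with
  | nil => rfl
  | cons hd tl ih =>
      obtain ⟨r, c, text⟩ := hd
      simp only [pvScanColA, pvRawCol]
      split_ifs <;> simp [ih]

-- the first component of B's fold is the first raw row-label, for any accumulator
theorem fold_fst (row col : Int) (cells : List (Int × Int × String))
    (a b : Option String) :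
    (cells.foldl (pvStepB row col) (a, b)).1
      = match a with
        | some s => some s
        | none => pvRawRow row col cells := by
  induction cells generalizing a b with
  | nil => cases a <;> rfl
  | cons hd tl ih =>
      obtain ⟨r, c, text⟩ := hd
      simp only [List.foldl_cons, pvStepB, ih, pvRawRow]
      cases a with
      | some s => simp
      | none => split_ifs with h <;> simp_all

theorem fold_snd (row col : Int) (cells : List (Int × Int × String))
    (a b : Option String) :
    (cells.foldl (pvStepB row col) (a, b)).2
      = match b with
        | some s => some s
        | none => pvRawCol row col cells := by
  induction cells generalizing a b with
  | nil => cases b <;> rfl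
  | cons hd tl ih =>
      obtain ⟨r, c, text⟩ := hd
      simp only [List.foldl_cons, pvStepB, ih, pvRawCol]
      cases b with
      | some s => simp
      | none => split_ifs with h <;> simp_all

-- ===== VERDICT (by name: the statement is the Claim_ definition above) =====
theorem find_label_for_cell_py_spec : Claim_equal_find_label_for_cell_py := by
  intro analysis row col _ _
  unfold Spec_find_label_for_cell_py find_label_for_cell_py find_label_for_cell_py_alt
  simp only [pvKeyB_eq_A, fold_fst, fold_snd, scanRowA_map, scanColA_map]
  generalize (pvKeyA analysis).getD [] = cells
  cases hr : pvRawRow row col cells with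
  | some s => simp [pvCleanA]
  | none =>
      cases hc : pvRawCol row col cells with
      | some s => simp [pvCleanA]
      | none => simp
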